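-- pv_equiv track=rewrite | github.com/Data-Science-2Like/arXive-crawler | dataCrawler.py | fetch_ordered
-- ===== SOURCE A (Python) =====
-- def fetch_ordered(job_queue, completed):
--     job_queue.sort()
--     completed.sort()
--
--     remaining = []
--     idx_jobs = 0
--     idx_c = 0
--     while (idx_jobs < len(job_queue) and idx_c < len(completed)):
--         if job_queue[idx_jobs][0] == completed[idx_c]:
--             idx_jobs += 1
--             idx_c += 1
--             continue
--         if job_queue[idx_jobs][0] > completed[idx_c]:
--             idx_c += 1
--             continue
--         if job_queue[idx_jobs][0] < completed[idx_c]: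
--             remaining.append(job_queue[idx_jobs])
--             idx_jobs += 1
--             continue
--     while (idx_jobs < len(job_queue)):
--         remaining.append(job_queue[idx_jobs])
--         idx_jobs += 1
--
--     return remaining
-- ===== SOURCE B (Python) =====
-- def fetch_ordered(job_queue, completed):
--     # Same in-place sorts as the original (mutation preserved); return value = sorted jobs
--     # minus one job per matching completed key, done via a count dictionary instead of a merge.
--     job_queue.sort()
--     completed.sort()
--     counts = {}
--     for key in completed:
--         counts[key] = counts.get(key, 0) + 1
--     remaining = []
--     for job in job_queue:
--         if counts.get(job[0], 0) > 0:
--             counts[job[0]] = counts[job[0]] - 1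
--         else:
--             remaining.append(job)
--     return remaining
-- ===== Notes on version B (the rewrite author's own statement) =====
-- stated objective: alternative
-- what changed: Replaces the two-pointer merge over the two sorted lists by building a count dictionary of completed keys and then filtering the sorted jobs in one pass, decrementing a count per skipped job (multiset removal without any positional coupling between the lists); both in-place sorts are kept for the argument mutation.
import Mathlib
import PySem

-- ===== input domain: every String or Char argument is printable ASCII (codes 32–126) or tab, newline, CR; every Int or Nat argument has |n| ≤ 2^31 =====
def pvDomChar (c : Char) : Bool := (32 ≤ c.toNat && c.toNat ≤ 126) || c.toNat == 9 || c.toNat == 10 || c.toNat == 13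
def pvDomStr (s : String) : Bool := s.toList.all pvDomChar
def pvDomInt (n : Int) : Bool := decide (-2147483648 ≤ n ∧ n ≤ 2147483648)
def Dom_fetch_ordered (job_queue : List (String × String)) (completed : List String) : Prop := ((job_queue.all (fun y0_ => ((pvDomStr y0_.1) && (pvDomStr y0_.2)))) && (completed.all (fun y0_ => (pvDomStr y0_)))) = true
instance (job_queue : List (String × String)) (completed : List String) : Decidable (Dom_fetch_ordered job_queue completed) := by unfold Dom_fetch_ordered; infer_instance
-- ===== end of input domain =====

-- B drops jobs by decrementing a dictionary of completed-key counts instead of A's two-pointer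
-- merge; both Pythons sort their arguments in place (a side effect this file does not model):
-- the theorems are about the RETURN value only.

-- ===== PORT A =====
-- the two while loops of A as structural recursion on (job_queue, completed); since String is
-- linearly ordered, the third 'if job_queue[idx_jobs][0] < completed[idx_c]' is exactly the
-- remaining case, so it is the final 'else' here.
def pvMergeA : List (String × String) → List String → List (String × String)
  | js, [] => js                    -- first loop exits (idx_c at end); second loop appends the rest of js
  | [], _ :: _ => []
  | j :: js, c :: cs =>
    if j.1 = c then pvMergeA js cs
    else if c < j.1 then pvMergeA (j :: js) cs
    else j :: pvMergeA js (c :: cs)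

def fetch_ordered (job_queue : List (String × String)) (completed : List String) : List (String × String) :=
  -- job_queue.sort() on pairs of strings = Python's tuple (lexicographic) sort
  let js := PySem.List.sorted2 job_queue Prod.fst Prod.snd false
  let cs := PySem.List.sorted completed (fun x => x) false
  pvMergeA js cs

-- ===== PORT B =====
-- B's second loop: 'if counts.get(job[0], 0) > 0: counts[job[0]] -= 1 else: remaining.append(job)'
def pvFilterC : List (String × String) → PySem.Dict String Int → List (String × String)
  | [], _ => []
  | j :: js, counts =>
    if counts.getD j.1 0 > 0 then pvFilterC js (counts.insert j.1 (counts.getD j.1 0 - 1))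
    else j :: pvFilterC js counts

def fetch_ordered_alt (job_queue : List (String × String)) (completed : List String) : List (String × String) :=
  let js := PySem.List.sorted2 job_queue Prod.fst Prod.snd false
  let cs := PySem.List.sorted completed (fun x => x) false
  -- B's first loop: 'counts[key] = counts.get(key, 0) + 1'
  let counts := cs.foldl (fun d k => d.insert k (d.getD k 0 + 1)) PySem.Dict.empty
  pvFilterC js counts

-- ===== PRECONDITION & SPEC =====
def Spec_fetch_ordered (job_queue : List (String × String)) (completed : List String) (out : List (String × String)) : Prop := out = fetch_ordered_alt job_queue completed
instance (job_queue : List (String × String)) (completed : List String) (out : List (String × String)) : Decidable (Spec_fetch_ordered job_queue completed out) := by unfold Spec_fetch_ordered; infer_instance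

-- ===== CLAIM (what is proved, stated in full; the proofs are below) =====
def Claim_equal_fetch_ordered : Prop := ∀ (job_queue : List (String × String)) (completed : List String), Dom_fetch_ordered job_queue completed → Spec_fetch_ordered job_queue completed (fetch_ordered job_queue completed)

-- ===== LEMMAS AND PROOFS =====

-- proof-only intermediate program: one-occurrence removal by membership + erase on a pending list
def pvFilterB : List (String × String) → List String → List (String × String)
  | [], _ => []
  | j :: js, pending =>
    if j.1 ∈ pending then pvFilterB js (pending.erase j.1)
    else j :: pvFilterB js pending

-- sorted2 with keys k1, k2 is sorted with the lexicographic key (same comparator, Bool-equal pointwise)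
theorem pvSorted2_eq_sorted_lex {α : Type} (xs : List (α)) (k1 k2 : α → String) :
    PySem.List.sorted2 xs k1 k2 false = PySem.List.sorted xs (fun x => toLex (k1 x, k2 x)) false := by
  have hcmp : (fun a b => decide (k1 a < k1 b) || (!decide (k1 b < k1 a) && decide (k2 a < k2 b)))
      = (fun a b : α => decide ((toLex (k1 a, k2 a)) < toLex (k1 b, k2 b))) := by
    funext a b
    rcases lt_trichotomy (k1 a) (k1 b) with h | h | h
    · simp [h, Prod.Lex.lt_iff]
    · simp [h, Prod.Lex.lt_iff]
    · have hne : k1 a ≠ k1 b := ne_of_gt h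
      simp [h, not_lt_of_gt h, Prod.Lex.lt_iff, hne]
  unfold PySem.List.sorted2 PySem.List.sorted
  simp only [Bool.false_eq_true, if_false, hcmp]

-- pvFilterB with an empty pending list keeps every job
theorem pvFilterB_nil (js : List (String × String)) : pvFilterB js [] = js := by
  induction js with
  | nil => rfl
  | cons j js ih => simp [pvFilterB, ih]

-- a pending key smaller than every job key is inert: it is never found nor removed
theorem pvFilterB_cons_inert (js : List (String × String)) (c : String) (X : List String)
    (h : ∀ p ∈ js, c < p.1) : pvFilterB js (c :: X) = pvFilterB js X := by
  induction js generalizing X with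
  | nil => rfl
  | cons j js ih =>
    have hc : c ≠ j.1 := ne_of_lt (h j (List.mem_cons_self ..))
    have hmem : (j.1 ∈ c :: X) ↔ j.1 ∈ X := by simp [hc.symm]
    have herase : (c :: X).erase j.1 = c :: X.erase j.1 :=
      List.erase_cons_tail (by simp [hc])
    have htail : ∀ p ∈ js, c < p.1 := fun p hp => h p (List.mem_cons_of_mem _ hp)
    by_cases hx : j.1 ∈ X
    · simp only [pvFilterB, if_pos (hmem.mpr hx), if_pos hx, herase]
      exact ih _ htail
    · simp only [pvFilterB, if_neg hx, if_neg (fun hh => hx (hmem.mp hh))]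
      exact congrArg _ (ih _ htail)

-- on key-sorted jobs and a sorted completed list the merge and the remove-filter agree
theorem pvMergeA_eq_pvFilterB (js : List (String × String)) (cs : List String)
    (hjs : js.Pairwise (fun a b => a.1 ≤ b.1)) (hcs : cs.Pairwise (· ≤ ·)) :
    pvMergeA js cs = pvFilterB js cs := by
  induction js, cs using pvMergeA.induct with
  | case1 js => simp [pvMergeA, pvFilterB_nil]
  | case2 c cs => simp [pvMergeA, pvFilterB]
  | case3 j js cs ih =>
    have herase : (j.1 :: cs).erase j.1 = cs := List.erase_cons_head j.1 cs
    simp only [pvMergeA, pvFilterB, List.mem_cons, true_or, if_true, herase]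
    exact ih hjs.of_cons hcs.of_cons
  | case4 j js c cs heq hlt ih =>
    have hall : ∀ p ∈ j :: js, c < p.1 := by
      intro p hp
      rcases List.mem_cons.mp hp with rfl | hp
      · exact hlt
      · exact lt_of_lt_of_le hlt (List.rel_of_pairwise_cons hjs hp)
    rw [show pvMergeA (j :: js) (c :: cs) = pvMergeA (j :: js) cs by
          simp [pvMergeA, heq, hlt]]
    rw [pvFilterB_cons_inert _ _ _ hall]
    exact ih hjs hcs.of_cons
  | case5 j js c cs heq hnlt ih =>
    have hjc : j.1 < c := lt_of_le_of_ne (not_lt.mp hnlt) heq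
    have hnotmem : j.1 ∉ c :: cs := by
      intro hm
      rcases List.mem_cons.mp hm with h | h
      · exact heq h
      · exact absurd (List.rel_of_pairwise_cons hcs h) (not_le.mpr hjc)
    simp only [pvMergeA, if_neg heq, if_neg hnlt, pvFilterB, if_neg hnotmem]
    exact congrArg _ (ih hjs.of_cons hcs)

-- the remove-filter and the count-filter agree whenever the dictionary holds exactly
-- the multiplicities of the pending list
theorem pvFilterB_eq_pvFilterC (js : List (String × String)) (pending : List String)
    (d : PySem.Dict String Int) (h : ∀ k, d.getD k 0 = (pending.count k : Int)) :
    pvFilterB js pending = pvFilterC js d := by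
  induction js generalizing pending d with
  | nil => rfl
  | cons j js ih =>
    by_cases hm : j.1 ∈ pending
    · have hpos : d.getD j.1 0 > 0 := by
        rw [h]; exact_mod_cast List.count_pos_iff.mpr hm
      have hinv : ∀ k, (d.insert j.1 (d.getD j.1 0 - 1)).getD k 0
          = ((pending.erase j.1).count k : Int) := by
        intro k
        rw [PySem.Dict.getD_insert]
        by_cases hk : k = j.1
        · subst hk
          rw [if_pos rfl, h, List.count_erase_self]
          have := List.count_pos_iff.mpr hm
          omega
        · rw [if_neg hk, h, List.count_erase_of_ne hk]
      simp only [pvFilterB, if_pos hm, pvFilterC, if_pos hpos]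
      exact ih _ _ hinv
    · have hz : ¬ d.getD j.1 0 > 0 := by
        rw [h, List.count_eq_zero_of_not_mem hm]; omega
      simp only [pvFilterB, if_neg hm, pvFilterC, if_neg hz]
      exact congrArg _ (ih _ _ h)

-- the sorted jobs list is nondecreasing in its first component
theorem pvSortedJobs_pairwise (job_queue : List (String × String)) :
    (PySem.List.sorted2 job_queue Prod.fst Prod.snd false).Pairwise (fun a b => a.1 ≤ b.1) := by
  rw [pvSorted2_eq_sorted_lex]
  have h := PySem.List.sorted_pairwise (κ := Lex (String × String)) job_queue
      (fun x => toLex (x.1, x.2))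
  exact h.imp (fun {a b} hab => by
    rcases Prod.Lex.le_iff.mp hab with h1 | ⟨h1, _⟩
    · exact le_of_lt h1
    · exact le_of_eq h1)

-- ===== VERDICT (by name: the statement is the Claim_ definition above) =====
theorem fetch_ordered_spec : Claim_equal_fetch_ordered := by
  intro job_queue completed _
  show fetch_ordered job_queue completed = fetch_ordered_alt job_queue completed
  unfold fetch_ordered fetch_ordered_alt
  rw [pvMergeA_eq_pvFilterB _ _ (pvSortedJobs_pairwise job_queue)
    (PySem.List.sorted_pairwise completed (fun x => x))]
  exact pvFilterB_eq_pvFilterC _ _ _ (fun k => by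
    rw [PySem.Dict.getD_foldl_insert_add_one, PySem.Dict.getD_empty]; omega)
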